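-- pv_equiv track=rewrite | github.com/HadjSassi/geekshack3 | scode/saheliano/prob18/main.py | update
-- ===== SOURCE A (Python) =====
-- def replace_in_list(a, b, s, start):
--     ct = 0
--     for i in range(start, len(s)):
--         if s[i] == a :
--             ct +=1
--             s[i] = b
--     return  ct
--
-- def two_equal(s:list):
--     for ind, element in enumerate(s):
--         try:
--             same_ind = s.index(element, ind+1)
--
--             if same_ind > ind+1:
--                 return ind, same_ind
--         except:
--             pass
--     return False
--
-- def update(s, count):
--     eq = two_equal(s)
--     if eq==False:
--         return count
--     else:
--         ind, same_ind = two_equal(s)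
--         for i in range(ind+1, same_ind):
--             caract = s[i]
--             s[i] = s[ind]
--             count += 1
--             count += replace_in_list(caract, s[ind], s, same_ind+1)
--         return update(s, count)
-- ===== SOURCE B (Python) =====
-- def _find_pair(s):
--     # next-occurrence index for each position, built right-to-left with a dict
--     n = len(s)
--     nxt = [None] * n
--     last = {}
--     for i in range(n - 1, -1, -1):
--         nxt[i] = last.get(s[i])
--         last[s[i]] = i
--     for i, j in enumerate(nxt):
--         if j is not None and j > i + 1:
--             return i, j
--     return None
--
--
-- def update(s, count):
--     s = list(s)
--     while True:
--         pair = _find_pair(s)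
--         if pair is None:
--             return count
--         ind, same = pair
--         v = s[ind]
--         mid = set(s[ind + 1:same])
--         count += same - ind - 1 + sum(1 for x in s[same + 1:] if x in mid)
--         s = [v if ind < j < same or (same < j and x in mid) else x
--              for j, x in enumerate(s)]
-- ===== Notes on version B (the rewrite author's own statement) =====
-- stated objective: faster
-- what changed: B finds the first non-adjacent duplicate pair via a next-occurrence array built in one right-to-left dict pass instead of calling list.index for every position, and rewrites the list in a single set-membership pass per round instead of A's per-element suffix rescans; B also does not mutate the caller's list.
import Mathlib
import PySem

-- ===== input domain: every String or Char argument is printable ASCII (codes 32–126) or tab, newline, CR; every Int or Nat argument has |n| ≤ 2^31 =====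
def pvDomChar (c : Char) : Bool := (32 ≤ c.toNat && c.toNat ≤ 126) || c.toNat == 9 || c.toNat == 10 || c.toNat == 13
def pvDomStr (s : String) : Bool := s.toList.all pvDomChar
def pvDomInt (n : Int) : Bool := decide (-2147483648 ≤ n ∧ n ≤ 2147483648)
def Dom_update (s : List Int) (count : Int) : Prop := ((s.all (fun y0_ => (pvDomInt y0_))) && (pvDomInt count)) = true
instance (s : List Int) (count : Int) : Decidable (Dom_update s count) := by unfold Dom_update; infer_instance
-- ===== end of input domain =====

-- B replaces A's quadratic duplicate-pair search (list.index per position) by a next-occurrence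
-- array built with one right-to-left dict pass, and A's sequential per-element suffix rewriting
-- by one set-membership pass; A mutates its list argument in place, B does not (the equivalence
-- proved here is about the return value only).

-- ===== PORT A =====
-- s.index(x, start): first index ≥ start holding x (scan of s.drop start, counting from start)
def pyIndexGo (x : Int) : List Int → Nat → Option Nat
  | [], _ => none
  | y :: r, i => if y == x then some i else pyIndexGo x r (i + 1)

def pyIndexFrom (s : List Int) (x : Int) (start : Nat) : Option Nat :=
  pyIndexGo x (s.drop start) start

-- two_equal: for ind, element in enumerate(s): … (rest is s.drop ind, ind the running index)
def twoEqualGo (s : List Int) : List Int → Nat → Option (Nat × Nat)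
  | [], _ => none
  | x :: rest, ind =>
    match pyIndexFrom s x (ind + 1) with
    | some j => if ind + 1 < j then some (ind, j) else twoEqualGo s rest (ind + 1)
    | none => twoEqualGo s rest (ind + 1)

def twoEqual (s : List Int) : Option (Nat × Nat) := twoEqualGo s s 0

-- replace_in_list: returns the mutated list together with ct
def replaceInList (a b : Int) (s : List Int) (start : Nat) : List Int × Int :=
  (List.range' start (s.length - start)).foldl
    (fun st i => if st.1.getD i 0 == a then (st.1.set i b, st.2 + 1) else st) (s, 0)

-- the recursion of update; the fuel only makes the recursion structural (s.length + 1 always suffices)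
def updateGo : Nat → List Int → Int → Int
  | 0, _, count => count
  | fuel + 1, s, count =>
    match twoEqual s with
    | none => count
    | some (ind, same) =>
      let st := (List.range' (ind + 1) (same - (ind + 1))).foldl
        (fun (st : List Int × Int) i =>
          let caract := st.1.getD i 0
          let s1 := st.1.set i (st.1.getD ind 0)
          let r := replaceInList caract (s1.getD ind 0) s1 (same + 1)
          (r.1, st.2 + 1 + r.2)) (s, count)
      updateGo fuel st.1 st.2

def update (s : List Int) (count : Int) : Int := updateGo (s.length + 1) s count

-- ===== PORT B =====
-- right-to-left pass: dict 'last' of first occurrence in the suffix, plus the nxt array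
def nxtFrom : List Int → Nat → PySem.Dict Int Nat × List (Option Nat)
  | [], _ => (PySem.Dict.empty, [])
  | x :: rest, i =>
    let r := nxtFrom rest (i + 1)
    (r.1.insert x i, r.1.get? x :: r.2)

-- for i, j in enumerate(nxt): first i with nxt[i] = some j, j > i+1
def findPairGo : List (Option Nat) → Nat → Option (Nat × Nat)
  | [], _ => none
  | o :: rest, i =>
    match o with
    | some j => if i + 1 < j then some (i, j) else findPairGo rest (i + 1)
    | none => findPairGo rest (i + 1)

def findPair (s : List Int) : Option (Nat × Nat) := findPairGo (nxtFrom s 0).2 0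

-- the while loop; fuel only makes it structural (s.length + 1 always suffices)
def updateAltGo : Nat → List Int → Int → Int
  | 0, _, count => count
  | fuel + 1, s, count =>
    match findPair s with
    | none => count
    | some (ind, same) =>
      let v := s.getD ind 0
      let mid : PySem.Set Int :=
        PySem.Set.ofList (PySem.List.slice s (some ((ind + 1 : Nat) : Int)) (some ((same : Nat) : Int)))
      let count' := count + ((same : Int) - (ind : Int) - 1)
        + (((PySem.List.slice s (some ((same + 1 : Nat) : Int)) none).countP (fun x => decide (x ∈ mid)) : Nat) : Int)
      let s' := s.zipIdx.map (fun p =>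
        if (ind < p.2 ∧ p.2 < same) ∨ (same < p.2 ∧ p.1 ∈ mid) then v else p.1)
      updateAltGo fuel s' count'

def update_alt (s : List Int) (count : Int) : Int := updateAltGo (s.length + 1) s count

-- ===== PRECONDITION & SPEC =====
def Spec_update (s : List Int) (count : Int) (out : Int) : Prop := out = update_alt s count
instance (s : List Int) (count : Int) (out : Int) : Decidable (Spec_update s count out) := by unfold Spec_update; infer_instance

-- ===== CLAIM (what is proved, stated in full; the proofs are below) =====
def Claim_equal_update : Prop := ∀ (s : List Int) (count : Int), Dom_update s count → Spec_update s count (update s count)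

-- ===== LEMMAS AND PROOFS =====

theorem nxt_dict : ∀ (l : List Int) (i : Nat) (x : Int),
    ((nxtFrom l i).1).get? x = pyIndexGo x l i := by
  intro l
  induction l with
  | nil => intro i x; simp [nxtFrom, pyIndexGo, PySem.Dict.get?, PySem.Dict.empty]
  | cons y r ih =>
    intro i x
    simp only [nxtFrom, pyIndexGo]
    by_cases h : y = x
    · subst h
      rw [PySem.Dict.get?_insert_self]
      simp
    · rw [PySem.Dict.get?_insert_of_ne]
      · simp [h, ih]
      · exact fun hxy => h (by simpa using hxy.symm)

theorem scanEq (s : List Int) : ∀ (rest : List Int) (ind : Nat),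
    s.drop ind = rest → twoEqualGo s rest ind = findPairGo (nxtFrom rest ind).2 ind := by
  intro rest
  induction rest with
  | nil => intro ind _; simp [twoEqualGo, nxtFrom, findPairGo]
  | cons x r ih =>
    intro ind hdrop
    have hdrop' : s.drop (ind + 1) = r := by
      rw [← List.tail_drop, hdrop]; rfl
    simp only [twoEqualGo, nxtFrom, findPairGo]
    have hidx : pyIndexFrom s x (ind + 1) = pyIndexGo x r (ind + 1) := by
      simp [pyIndexFrom, hdrop']
    rw [hidx, nxt_dict]
    cases hpi : pyIndexGo x r (ind + 1) with
    | none => simp [ih (ind + 1) hdrop']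
    | some j =>
      by_cases hj : ind + 1 < j
      · simp [hj]
      · simp [hj, ih (ind + 1) hdrop']

theorem twoEqual_eq_findPair (s : List Int) : twoEqual s = findPair s := by
  unfold twoEqual findPair
  exact scanEq s s 0 (by simp)

theorem pyIndexGo_sound : ∀ (l : List Int) (i j : Nat) (x : Int),
    pyIndexGo x l i = some j →
    i ≤ j ∧ j - i < l.length ∧ (∀ k, k < j - i → l.getD k 0 ≠ x) ∧ l.getD (j - i) 0 = x := by
  intro l
  induction l with
  | nil => intro i j x h; simp [pyIndexGo] at h
  | cons y r ih =>
    intro i j x h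
    simp only [pyIndexGo] at h
    by_cases hy : y = x
    · simp [hy] at h
      subst h
      refine ⟨le_refl _, by simp, ?_, by simpa using hy⟩
      intro k hk; omega
    · have hy' : (y == x) = false := by simpa using hy
      rw [hy'] at h; simp at h
      obtain ⟨h1, h2, h3, h4⟩ := ih (i + 1) j x h
      refine ⟨by omega, by simp; omega, ?_, ?_⟩
      · intro k hk
        cases k with
        | zero => simpa using hy
        | succ k' =>
          simp only [List.getD_cons_succ]
          exact h3 k' (by omega)
      · have : j - i = (j - (i + 1)) + 1 := by omega
        rw [this, List.getD_cons_succ]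
        exact h4

theorem twoEqualGo_sound (s : List Int) : ∀ (rest : List Int) (i p q : Nat),
    s.drop i = rest → twoEqualGo s rest i = some (p, q) →
    i ≤ p ∧ p < s.length ∧ pyIndexFrom s (s.getD p 0) (p + 1) = some q ∧ p + 1 < q := by
  intro rest
  induction rest with
  | nil => intro i p q _ h; simp [twoEqualGo] at h
  | cons x r ih =>
    intro i p q hdrop h
    have hdrop' : s.drop (i + 1) = r := by rw [← List.tail_drop, hdrop]; rfl
    have hget : s.getD i 0 = x := by
      have h0 : (s.drop i).getD 0 0 = x := by rw [hdrop]; rfl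
      have hlen : i < s.length := by
        have := congrArg List.length hdrop
        simp at this; omega
      simpa [List.getD_eq_getElem?_getD, List.getElem?_drop] using h0
    simp only [twoEqualGo] at h
    cases hpi : pyIndexFrom s x (i + 1) with
    | none =>
      rw [hpi] at h
      obtain ⟨h1, h2, h3, h4⟩ := ih (i + 1) p q hdrop' h
      exact ⟨by omega, h2, h3, h4⟩
    | some j =>
      rw [hpi] at h
      by_cases hj : i + 1 < j
      · simp [hj] at h
        obtain ⟨rfl, rfl⟩ := h
        have hlen : i < s.length := by
          have := congrArg List.length hdrop
          simp at this; omega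
        exact ⟨le_refl _, hlen, by rw [hget]; exact hpi, hj⟩
      · simp [hj] at h
        obtain ⟨h1, h2, h3, h4⟩ := ih (i + 1) p q hdrop' h
        exact ⟨by omega, h2, h3, h4⟩

theorem pair_decomp (s : List Int) (ind same : Nat)
    (h : twoEqual s = some (ind, same)) :
    s = s.take (ind + 1) ++ ((s.drop (ind + 1)).take (same - (ind + 1)) ++ (s.getD ind 0 :: s.drop (same + 1)))
    ∧ (s.take (ind + 1)).length = ind + 1
    ∧ ((s.drop (ind + 1)).take (same - (ind + 1))).length = same - (ind + 1)
    ∧ ind + 1 < same ∧ same < s.length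
    ∧ (s.take (ind + 1)).getD ind 0 = s.getD ind 0
    ∧ s.getD ind 0 ∉ (s.drop (ind + 1)).take (same - (ind + 1)) := by
  obtain ⟨h0, hlen, hidx, hlt⟩ := twoEqualGo_sound s s 0 ind same (by simp) h
  set v := s.getD ind 0 with hv
  set l := s.drop (ind + 1) with hl
  obtain ⟨h1, h2, h3, h4⟩ := pyIndexGo_sound l (ind + 1) same v hidx
  have hlength : l.length = s.length - (ind + 1) := by simp [hl]
  have hsame : same < s.length := by omega
  have hltsame : ind + 1 < same := hlt
  have hk : same - (ind + 1) < l.length := h2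
  have hk' : same - (ind + 1) < s.length - (ind + 1) := by rw [← hlength]; exact h2
  refine ⟨?_, ?_, ?_, hltsame, hsame, ?_, ?_⟩
  · -- decomposition
    conv_lhs => rw [← List.take_append_drop (ind + 1) s]
    congr 1
    rw [← hl]
    conv_lhs => rw [← List.take_append_drop (same - (ind + 1)) l]
    congr 1
    have hdd : l.drop (same - (ind + 1)) = s.drop same := by
      rw [hl, List.drop_drop]
      congr 1; omega
    rw [hdd]
    have hcons : s.drop same = s.getD same 0 :: s.drop (same + 1) := by
      rw [List.drop_eq_getElem_cons hsame, List.getD_eq_getElem s 0 hsame]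
    rw [hcons]
    congr 1
    -- s.getD same 0 = v
    have hgd : l.getD (same - (ind + 1)) 0 = s.getD same 0 := by
      rw [hl, List.getD_eq_getElem?_getD, List.getD_eq_getElem?_getD, List.getElem?_drop]
      congr 2
      omega
    rw [← hgd, h4]
  · simp; omega
  · simp; omega
  · -- getD of take
    rw [hv]
    simp [List.getD_eq_getElem?_getD]
  · -- v not in middle
    intro hmem
    obtain ⟨k, hk', hkv⟩ := List.mem_iff_getElem.mp hmem
    have hk2 : k < same - (ind + 1) := by
      have := (l.take (same - (ind + 1))).length
      have hlen2 : (l.take (same - (ind + 1))).length = same - (ind + 1) := by simp; omega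
      omega
    have : l.getD k 0 = v := by
      have hkl : k < l.length := by omega
      rw [List.getD_eq_getElem l 0 hkl]
      rw [← hkv]
      simp [List.getElem_take]
    exact h3 k hk2 this

theorem foldReplace (a b : Int) : ∀ (T pre : List Int) (c : Int),
    (List.range' pre.length T.length).foldl
      (fun st i => if st.1.getD i 0 == a then (st.1.set i b, st.2 + 1) else st) (pre ++ T, c)
    = (pre ++ T.map (fun y => if y == a then b else y),
       c + (T.countP (fun y => y == a) : Int)) := by
  intro T
  induction T with
  | nil => intro pre c; simp
  | cons y T' ih =>
    intro pre c
    rw [show (y :: T').length = T'.length + 1 from rfl, List.range'_succ]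
    simp only [List.foldl_cons]
    have hget : (pre ++ y :: T').getD pre.length 0 = y := by
      rw [List.getD_append_right _ _ _ _ (le_refl _)]
      simp
    rw [hget]
    by_cases hy : y == a
    · rw [if_pos hy]
      have hset : (pre ++ y :: T').set pre.length b = (pre ++ [b]) ++ T' := by
        rw [List.set_append]
        simp
      rw [hset]
      have hlen : pre.length + 1 = (pre ++ [b]).length := by simp
      rw [hlen, ih (pre ++ [b]) (c + 1)]
      simp only [List.map_cons, List.countP_cons, hy, if_true, Prod.mk.injEq]
      constructor
      · simp
      · push_cast; ring
    · rw [if_neg hy]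
      have hyf : (y == a) = false := by simpa using hy
      have hsplit : pre ++ y :: T' = (pre ++ [y]) ++ T' := by simp
      rw [hsplit]
      have hlen : pre.length + 1 = (pre ++ [y]).length := by simp
      rw [hlen, ih (pre ++ [y]) c]
      simp only [List.map_cons, List.countP_cons, hyf, Prod.mk.injEq]
      constructor
      · simp
      · simp

theorem replaceInList_eq (a b : Int) (pre T : List Int) :
    replaceInList a b (pre ++ T) pre.length
    = (pre ++ T.map (fun y => if y == a then b else y),
       (T.countP (fun y => y == a) : Int)) := by
  unfold replaceInList
  have hl : (pre ++ T).length - pre.length = T.length := by simp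
  rw [hl, foldReplace]
  simp

-- proof-only helper: the sequential suffix rewriting A performs, one middle element at a time
def seqRep (v : Int) : List Int → List Int × Int → List Int × Int
  | [], st => st
  | m :: M, st =>
      seqRep v M (st.1.map (fun y => if y == m then v else y),
                  st.2 + 1 + (st.1.countP (fun y => y == m) : Int))

theorem loopA (ind same : Nat) (v : Int) : ∀ (M P T : List Int) (c : Int),
    ind < P.length → P.getD ind 0 = v → same = P.length + M.length →
    (List.range' P.length M.length).foldl
      (fun (st : List Int × Int) i =>
        let caract := st.1.getD i 0
        let s1 := st.1.set i (st.1.getD ind 0)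
        let r := replaceInList caract (s1.getD ind 0) s1 (same + 1)
        (r.1, st.2 + 1 + r.2)) (P ++ (M ++ v :: T), c)
    = (P ++ (M.map (fun _ => v) ++ v :: (seqRep v M (T, c)).1), (seqRep v M (T, c)).2) := by
  intro M
  induction M with
  | nil => intro P T c h1 h2 h3; simp [seqRep]
  | cons m M' ih =>
    intro P T c h1 h2 h3
    rw [show (m :: M').length = M'.length + 1 from rfl, List.range'_succ]
    simp only [List.foldl_cons]
    have hgm : (P ++ (m :: M' ++ v :: T)).getD P.length 0 = m := by
      rw [List.getD_append_right _ _ _ _ (le_refl _)]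
      simp
    have hgi1 : (P ++ (m :: M' ++ v :: T)).getD ind 0 = v := by
      rw [List.getD_append _ _ _ _ h1]; exact h2
    have hset : (P ++ (m :: M' ++ v :: T)).set P.length v
        = (P ++ (v :: M' ++ [v])) ++ T := by
      rw [List.set_append]
      simp
    have hgi2 : ((P ++ (v :: M' ++ [v])) ++ T).getD ind 0 = v := by
      have hp : ind < (P ++ (v :: M' ++ [v])).length := by simp; omega
      rw [List.getD_append _ _ _ _ hp, List.getD_append _ _ _ _ h1]
      exact h2
    have hprelen : (P ++ (v :: M' ++ [v])).length = same + 1 := by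
      simp at h3 ⊢; omega
    have hrep := replaceInList_eq m v (P ++ (v :: M' ++ [v])) T
    rw [hprelen] at hrep
    simp only [hgm, hgi1, hset, hgi2, hrep]
    have hre : (P ++ (v :: M' ++ [v])) ++ T.map (fun y => if y == m then v else y)
        = (P ++ [v]) ++ (M' ++ v :: T.map (fun y => if y == m then v else y)) := by
      simp
    rw [hre]
    have hlen2 : P.length + 1 = (P ++ [v]).length := by simp
    rw [hlen2, ih (P ++ [v]) (T.map (fun y => if y == m then v else y))
          (c + 1 + (T.countP (fun y => y == m) : Int))
          (by simp; omega)
          (by rw [List.getD_append _ _ _ _ h1]; exact h2)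
          (by simp at h3 ⊢; omega)]
    simp [seqRep]

theorem countP_split (m v : Int) (M' : List Int) (hv : v ∉ M') : ∀ T : List Int,
    T.countP (fun y => decide ((if y == m then v else y) ∈ M'))
      + T.countP (fun y => y == m)
    = T.countP (fun y => decide (y ∈ m :: M')) := by
  intro T
  induction T with
  | nil => simp
  | cons z T' ih =>
    rw [List.countP_cons, List.countP_cons, List.countP_cons]
    by_cases hz : z = m
    · have hb : (z == m) = true := by simpa using hz
      have e1 : (decide ((if z == m then v else z) ∈ M')) = false := by
        rw [hb]; simpa using hv
      have e2 : (decide (z ∈ m :: M')) = true := by simp [hz]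
      rw [e1, hb, e2]
      simp only [show (if (false : Bool) = true then 1 else 0) = 0 from rfl]
      omega
    · have hb : (z == m) = false := by simpa using hz
      have e1 : (decide ((if z == m then v else z) ∈ M')) = decide (z ∈ M') := by
        rw [hb]; simp
      have e2 : (decide (z ∈ m :: M')) = decide (z ∈ M') := by simp [hz]
      rw [e1, hb, e2]
      simp only [show (if (false : Bool) = true then 1 else 0) = 0 from rfl]
      omega

theorem seqRep_eq (v : Int) : ∀ (M T : List Int) (c : Int), v ∉ M →
    seqRep v M (T, c)
    = (T.map (fun y => if y ∈ M then v else y),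
       c + (M.length : Int) + (T.countP (fun y => decide (y ∈ M)) : Int)) := by
  intro M
  induction M with
  | nil => intro T c _; simp [seqRep]
  | cons m M' ih =>
    intro T c hv
    have hv' : v ∉ M' := fun h => hv (List.mem_cons_of_mem _ h)
    simp only [seqRep]
    rw [ih _ _ hv']
    simp only [Prod.mk.injEq]
    constructor
    · rw [List.map_map]
      apply List.map_congr_left
      intro y _
      by_cases hy : y = m
      · subst hy
        simp [hv']
      · simp only [Function.comp_apply, show (y == m) = false from by simpa using hy]
        simp [hy]
    · rw [List.countP_map]
      have hs := countP_split m v M' hv' T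
      simp only [Function.comp_def, List.length_cons] at hs ⊢
      omega

theorem zip_region_P (ind same : Nat) (v : Int) (mid : List Int) (P : List Int)
    (hP : P.length ≤ ind + 1) (his : ind < same) :
    (P.zipIdx 0).map (fun p : Int × Nat =>
        if (ind < p.2 ∧ p.2 < same) ∨ (same < p.2 ∧ p.1 ∈ mid) then v else p.1) = P := by
  have : ∀ p ∈ P.zipIdx 0, (fun p : Int × Nat =>
      if (ind < p.2 ∧ p.2 < same) ∨ (same < p.2 ∧ p.1 ∈ mid) then v else p.1) p
      = Prod.fst p := by
    intro p hp
    obtain ⟨x, i⟩ := p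
    obtain ⟨_, hi, _⟩ := List.mem_zipIdx hp
    have h1 : ¬ (ind < i ∧ i < same) := by omega
    have h2 : ¬ (same < i) := by omega
    simp only [h1, false_or]
    rw [if_neg (by tauto)]
  rw [List.map_congr_left this, List.zipIdx_map_fst]

theorem zip_region_M (ind same : Nat) (v : Int) (mid : List Int) (M : List Int)
    (hM : same = ind + 1 + M.length) :
    (M.zipIdx (ind + 1)).map (fun p : Int × Nat =>
        if (ind < p.2 ∧ p.2 < same) ∨ (same < p.2 ∧ p.1 ∈ mid) then v else p.1)
    = M.map (fun _ => v) := by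
  have : ∀ p ∈ M.zipIdx (ind + 1), (fun p : Int × Nat =>
      if (ind < p.2 ∧ p.2 < same) ∨ (same < p.2 ∧ p.1 ∈ mid) then v else p.1) p
      = (fun _ => v) p := by
    intro p hp
    obtain ⟨x, i⟩ := p
    obtain ⟨hi1, hi2, _⟩ := List.mem_zipIdx hp
    have h1 : (ind < i ∧ i < same) := by omega
    show (if (ind < i ∧ i < same) ∨ (same < i ∧ x ∈ mid) then v else x) = v
    exact if_pos (Or.inl h1)
  rw [List.map_congr_left this]
  rw [List.map_const', List.map_const', List.length_zipIdx]

theorem zip_region_T (ind same : Nat) (v : Int) (M : List Int) (T : List Int) :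
    (T.zipIdx (same + 1)).map (fun p : Int × Nat =>
        if (ind < p.2 ∧ p.2 < same) ∨ (same < p.2 ∧ p.1 ∈ PySem.Set.ofList M) then v else p.1)
    = T.map (fun y => if y ∈ M then v else y) := by
  have : ∀ p ∈ T.zipIdx (same + 1), (fun p : Int × Nat =>
      if (ind < p.2 ∧ p.2 < same) ∨ (same < p.2 ∧ p.1 ∈ PySem.Set.ofList M) then v else p.1) p
      = (fun p : Int × Nat => if p.1 ∈ M then v else p.1) p := by
    intro p hp
    obtain ⟨x, i⟩ := p
    obtain ⟨hi1, hi2, _⟩ := List.mem_zipIdx hp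
    have h1 : ¬ (ind < i ∧ i < same) := by omega
    have h2 : same < i := by omega
    simp only [h1, h2, false_or, true_and]
    by_cases hx : x ∈ M
    · rw [if_pos (by simpa [PySem.Set.mem_ofList] using hx), if_pos hx]
    · rw [if_neg (by simpa [PySem.Set.mem_ofList] using hx), if_neg hx]
  rw [List.map_congr_left this]
  have : (T.zipIdx (same + 1)).map (fun p : Int × Nat => if p.1 ∈ M then v else p.1)
      = ((T.zipIdx (same + 1)).map Prod.fst).map (fun y => if y ∈ M then v else y) := by
    rw [List.map_map]; rfl
  rw [this, List.zipIdx_map_fst]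

theorem step_eq (s : List Int) (ind same : Nat) (c : Int)
    (h : twoEqual s = some (ind, same)) :
    (List.range' (ind + 1) (same - (ind + 1))).foldl
      (fun (st : List Int × Int) i =>
        let caract := st.1.getD i 0
        let s1 := st.1.set i (st.1.getD ind 0)
        let r := replaceInList caract (s1.getD ind 0) s1 (same + 1)
        (r.1, st.2 + 1 + r.2)) (s, c)
    = (s.zipIdx.map (fun p =>
          if (ind < p.2 ∧ p.2 < same) ∨ (same < p.2 ∧ p.1 ∈ PySem.Set.ofList
              (PySem.List.slice s (some ((ind + 1 : Nat) : Int)) (some ((same : Nat) : Int))))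
          then s.getD ind 0 else p.1),
       c + ((same : Int) - (ind : Int) - 1)
         + ((PySem.List.slice s (some ((same + 1 : Nat) : Int)) none).countP
              (fun x => decide (x ∈ PySem.Set.ofList
                (PySem.List.slice s (some ((ind + 1 : Nat) : Int)) (some ((same : Nat) : Int))))) : Int)) := by
  obtain ⟨hdec, hP, hM, hlt, hlen, hPv, hvM⟩ := pair_decomp s ind same h
  have hslice1 : PySem.List.slice s (some ((ind + 1 : Nat) : Int)) (some ((same : Nat) : Int))
      = (s.drop (ind + 1)).take (same - (ind + 1)) := PySem.List.slice_natCast s (ind + 1) same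
  have hslice2 : PySem.List.slice s (some ((same + 1 : Nat) : Int)) none
      = s.drop (same + 1) := PySem.List.slice_from_natCast s (same + 1)
  rw [hslice1, hslice2]
  -- abbreviations
  set v := s.getD ind 0 with hv
  set P := s.take (ind + 1) with hPdef
  set M := (s.drop (ind + 1)).take (same - (ind + 1)) with hMdef
  set T := s.drop (same + 1) with hTdef
  -- the A-side loop
  have hrange : List.range' (ind + 1) (same - (ind + 1)) = List.range' P.length M.length := by
    rw [hP, hM]
  conv_lhs => rw [hrange, hdec]
  rw [loopA ind same v M P T c (by omega) hPv (by omega)]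
  rw [seqRep_eq v M T c hvM]
  -- the B-side list
  have hzip : s.zipIdx.map (fun p =>
        if (ind < p.2 ∧ p.2 < same) ∨ (same < p.2 ∧ p.1 ∈ PySem.Set.ofList M) then v else p.1)
      = P ++ (M.map (fun _ => v) ++ v :: T.map (fun y => if y ∈ M then v else y)) := by
    conv_lhs => rw [hdec]
    rw [List.zipIdx_append, List.zipIdx_append, List.zipIdx_cons, List.map_append, List.map_append]
    rw [show (0 + P.length) = ind + 1 by omega]
    rw [show (ind + 1 + M.length) = same by omega]
    rw [zip_region_P ind same v (PySem.Set.ofList M) P (by omega) (by omega)]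
    rw [zip_region_M ind same v (PySem.Set.ofList M) M (by omega)]
    rw [List.map_cons]
    rw [zip_region_T ind same v M T]
    simp
  rw [hzip]
  -- counts
  have hcnt : T.countP (fun x => decide (x ∈ PySem.Set.ofList M))
      = T.countP (fun y => decide (y ∈ M)) := by
    apply List.countP_congr
    intro x _
    simp [PySem.Set.mem_ofList]
  rw [hcnt]
  have harith : c + (M.length : Int) + (T.countP (fun y => decide (y ∈ M)) : Int)
      = c + ((same : Int) - (ind : Int) - 1) + (T.countP (fun y => decide (y ∈ M)) : Int) := by
    have : (M.length : Int) = (same : Int) - (ind : Int) - 1 := by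
      have := hM; push_cast [this]; omega
    rw [this]
  rw [harith]


theorem updateGo_eq_updateAltGo : ∀ (fuel : Nat) (s : List Int) (c : Int),
    updateGo fuel s c = updateAltGo fuel s c := by
  intro fuel
  induction fuel with
  | zero => intro s c; rfl
  | succ f ih =>
    intro s c
    show updateGo (f + 1) s c = updateAltGo (f + 1) s c
    rw [updateGo, updateAltGo, ← twoEqual_eq_findPair s]
    cases htE : twoEqual s with
    | none => rfl
    | some pr =>
      obtain ⟨ind, same⟩ := pr
      simp only
      rw [step_eq s ind same c htE]
      exact ih _ _

-- ===== VERDICT (by name: the statement is the Claim_ definition above) =====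
theorem update_spec : Claim_equal_update := by
  intro s count _
  unfold Spec_update update update_alt
  exact updateGo_eq_updateAltGo _ s count
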